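-- pv_equiv track=rewrite | github.com/planetfederal/qgis-webappbuilder-plugin | webappbuilder/settings.py | splitElements
-- ===== SOURCE A (Python) =====
-- def splitElements(s):
--     lines = s.splitlines()
--     css = {}
--     element = None
--     for line in lines:
--         if line.strip().startswith("/*"):
--             element = line.strip()[2:-2]
--             css[element] = []
--         elif element is not None:
--             css[element].append(line)
--     for element in css:
--         css[element] = "\n".join(css[element])
--     return css
-- ===== SOURCE B (Python) =====
-- def splitElements(s):
--     # One reverse pass: collect (name, joined-body) groups from the bottom up,
--     # then fill a dict in forward order (first position, last value wins).
--     groups = []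
--     pending = []
--     for line in reversed(s.splitlines()):
--         stripped = line.strip()
--         if stripped.startswith("/*"):
--             groups.append((stripped[2:-2], "\n".join(reversed(pending))))
--             pending = []
--         else:
--             pending.append(line)
--     css = {}
--     for name, text in reversed(groups):
--         css[name] = text
--     return css
-- ===== Notes on version B (the rewrite author's own statement) =====
-- stated objective: alternative
-- what changed: Replaces the forward stateful pass (current-element variable plus a dict of line lists joined afterwards) with a single reverse pass that emits complete (name, joined-body) groups at each header, then fills the dict in forward order.
import Mathlib
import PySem

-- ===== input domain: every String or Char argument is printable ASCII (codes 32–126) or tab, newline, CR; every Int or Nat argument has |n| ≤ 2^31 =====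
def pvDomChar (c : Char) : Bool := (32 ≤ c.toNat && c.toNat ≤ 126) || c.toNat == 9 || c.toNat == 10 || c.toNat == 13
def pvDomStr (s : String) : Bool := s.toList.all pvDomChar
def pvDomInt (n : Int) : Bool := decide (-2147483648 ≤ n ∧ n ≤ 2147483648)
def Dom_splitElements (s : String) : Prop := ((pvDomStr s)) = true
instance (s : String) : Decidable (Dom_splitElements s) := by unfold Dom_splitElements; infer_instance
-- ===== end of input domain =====

-- B replaces A's forward pass with a current-element state by a single reverse pass
-- emitting complete (name, joined-body) groups; alternative decomposition, same cost.

-- ===== PORT A =====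
-- line.strip().startswith("/*")
def pvIsHdr (line : String) : Bool := PySem.Str.startswith (PySem.Str.strip line) "/*"
-- line.strip()[2:-2]
def pvName (line : String) : String := PySem.Str.slice (PySem.Str.strip line) (some 2) (some (-2))

-- one iteration of A's first loop over (css, element)
def pvStepA (st : PySem.Dict String (List String) × Option String) (line : String) :
    PySem.Dict String (List String) × Option String :=
  if pvIsHdr line then
    let e := pvName line
    (st.1.insert e [], some e)
  else
    match st.2 with
    | some e => (st.1.modify e [] (· ++ [line]), some e)  -- css[element].append(line); the key is always present here
    | none => st

def splitElements (s : String) : List (String × String) :=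
  let lines := PySem.Str.splitlines s
  let st := lines.foldl pvStepA (PySem.Dict.empty, none)
  -- 'for element in css: css[element] = "\n".join(css[element])': rewriting each value in
  -- place over the distinct keys in insertion order is exactly a value map on the items
  st.1.items.map (fun p => (p.1, PySem.Str.join "\n" p.2))

-- ===== PORT B =====
-- one iteration of B's reverse loop over (groups, pending)
def pvStepB (st : List (String × String) × List String) (line : String) :
    List (String × String) × List String :=
  let stripped := PySem.Str.strip line
  if PySem.Str.startswith stripped "/*" then
    (st.1 ++ [(PySem.Str.slice stripped (some 2) (some (-2)),
               PySem.Str.join "\n" st.2.reverse)], [])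
  else
    (st.1, st.2 ++ [line])

def splitElements_alt (s : String) : List (String × String) :=
  let st := ((PySem.Str.splitlines s).reverse).foldl pvStepB ([], [])
  (st.1.reverse.foldl (fun (d : PySem.Dict String String) p => d.insert p.1 p.2)
      PySem.Dict.empty).items

-- ===== PRECONDITION & SPEC =====
def Spec_splitElements (s : String) (out : List (String × String)) : Prop := out = splitElements_alt s
instance (s : String) (out : List (String × String)) : Decidable (Spec_splitElements s out) := by unfold Spec_splitElements; infer_instance

-- ===== CLAIM (what is proved, stated in full; the proofs are below) =====
def Claim_equal_splitElements : Prop := ∀ (s : String), Dom_splitElements s → Spec_splitElements s (splitElements s)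

-- ===== LEMMAS AND PROOFS =====

-- the groups a CSS text decomposes into: (element name, body lines) per header, in order
def pvGroups : List String → List (String × List String)
  | [] => []
  | l :: ls =>
    if pvIsHdr l then
      (pvName l, ls.takeWhile (fun x => !pvIsHdr x)) ::
        pvGroups (ls.dropWhile (fun x => !pvIsHdr x))
    else pvGroups ls
termination_by ls => ls.length
decreasing_by
  · have := List.length_dropWhile_le (fun x => !pvIsHdr x) ls
    simp only [List.length_cons]; omega
  · simp

def pvJ (p : String × List String) : String × String := (p.1, PySem.Str.join "\n" p.2)

theorem pvGroups_dropWhile (ls : List String) :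
    pvGroups (ls.dropWhile (fun x => !pvIsHdr x)) = pvGroups ls := by
  induction ls with
  | nil => simp [pvGroups]
  | cons l ls ih =>
    by_cases h : pvIsHdr l
    · simp [h]
    · rw [List.dropWhile_cons]
      simp only [h, Bool.not_false, if_true]
      rw [ih]
      simp [pvGroups, h]

theorem pv_foldA_some (lines : List String) :
    ∀ (d : PySem.Dict String (List String)) (e : String) (v : List String),
    (lines.foldl pvStepA (d.insert e v, some e)).1
      = (pvGroups lines).foldl (fun d p => d.insert p.1 p.2)
          (d.insert e (v ++ lines.takeWhile (fun x => !pvIsHdr x))) := by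
  induction lines with
  | nil => intro d e v; simp [pvGroups]
  | cons l ls ih =>
    intro d e v
    by_cases h : pvIsHdr l
    · simp only [List.foldl_cons, pvStepA, h, if_true]
      rw [ih (d.insert e v) (pvName l) []]
      simp only [pvGroups, if_true, List.foldl_cons, List.takeWhile_cons, h, Bool.not_true]
      rw [pvGroups_dropWhile]
      simp
    · simp only [List.foldl_cons, pvStepA, h, if_false, Bool.false_eq_true]
      rw [show (d.insert e v).modify e [] (· ++ [l]) = d.insert e (v ++ [l]) by
        simp [PySem.Dict.modify, PySem.Dict.getD_insert_self, PySem.Dict.insert_insert_self]]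
      rw [ih d e (v ++ [l])]
      simp only [pvGroups, h, if_false, List.takeWhile_cons, Bool.not_eq_true', Bool.false_eq_true]
      simp [List.append_assoc]

theorem pv_foldA_none (lines : List String) :
    ∀ (d : PySem.Dict String (List String)),
    (lines.foldl pvStepA (d, none)).1
      = (pvGroups lines).foldl (fun d p => d.insert p.1 p.2) d := by
  induction lines with
  | nil => intro d; simp [pvGroups]
  | cons l ls ih =>
    intro d
    by_cases h : pvIsHdr l
    · simp only [List.foldl_cons, pvStepA, h, if_true]
      rw [pv_foldA_some ls d (pvName l) []]
      simp only [pvGroups, h, if_true, List.foldl_cons, List.nil_append]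
      rw [pvGroups_dropWhile]
    · simp only [List.foldl_cons, pvStepA, h, if_false, Bool.false_eq_true]
      rw [ih d]
      simp [pvGroups, h]

theorem pv_foldB (lines : List String) :
    lines.foldr (fun l st => pvStepB st l) (([] : List (String × String)), ([] : List String))
      = ((pvGroups lines).reverse.map pvJ,
         (lines.takeWhile (fun x => !pvIsHdr x)).reverse) := by
  induction lines with
  | nil => simp [pvGroups]
  | cons l ls ih =>
    simp only [List.foldr_cons, ih]
    by_cases h : pvIsHdr l
    · have h' : PySem.Str.startswith (PySem.Str.strip l) "/*" = true := h
      simp only [pvStepB, h', if_true, List.reverse_reverse]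
      simp only [pvGroups, h, if_true, List.takeWhile_cons, Bool.not_true]
      rw [pvGroups_dropWhile]
      simp [pvJ, pvName]
    · have h' : PySem.Str.startswith (PySem.Str.strip l) "/*" = false := by
        simpa [pvIsHdr] using h
      simp only [pvStepB, h', Bool.false_eq_true, if_false]
      simp [pvGroups, h]
  
theorem pv_mapmk_insert (d : PySem.Dict String (List String)) (k : String) (v : List String) :
    PySem.Dict.mk ((d.insert k v).items.map pvJ)
      = (PySem.Dict.mk (d.items.map pvJ)).insert k (PySem.Str.join "\n" v) := by
  apply PySem.Dict.ext
  have hc : (PySem.Dict.mk (d.items.map pvJ)).contains k = d.contains k := by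
    simp only [PySem.Dict.contains, List.any_map]
    rfl
  rw [show (PySem.Dict.mk ((d.insert k v).items.map pvJ)).items = (d.insert k v).items.map pvJ from rfl,
      PySem.Dict.items_insert, PySem.Dict.items_insert, hc]
  by_cases h : d.contains k
  · simp only [h, if_true, List.map_map]
    apply List.map_congr_left
    intro p _
    by_cases hp : p.1 == k
    · simp [pvJ, hp, Function.comp]
    · simp only [Function.comp, hp, Bool.false_eq_true, if_false]
      simp only [show (pvJ p).1 = p.1 from rfl, hp, Bool.false_eq_true, if_false]
  · simp [h, pvJ]

theorem pv_map_fold (gs : List (String × List String)) :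
    ∀ (d : PySem.Dict String (List String)),
    PySem.Dict.mk ((gs.foldl (fun d p => d.insert p.1 p.2) d).items.map pvJ)
      = (gs.map pvJ).foldl (fun d p => d.insert p.1 p.2) (PySem.Dict.mk (d.items.map pvJ)) := by
  induction gs with
  | nil => intro d; simp
  | cons g gs ih =>
    intro d
    simp only [List.foldl_cons, List.map_cons]
    rw [ih, pv_mapmk_insert]
    rfl

-- ===== VERDICT (by name: the statement is the Claim_ definition above) =====
theorem splitElements_spec : Claim_equal_splitElements := by
  unfold Claim_equal_splitElements
  intro s _
  unfold Spec_splitElements splitElements splitElements_alt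
  simp only [List.foldl_reverse]
  rw [pv_foldB (PySem.Str.splitlines s)]
  simp only [List.map_reverse, List.foldr_reverse]
  rw [pv_foldA_none (PySem.Str.splitlines s) PySem.Dict.empty]
  have h := pv_map_fold (pvGroups (PySem.Str.splitlines s)) PySem.Dict.empty
  have hitems := congrArg PySem.Dict.items h
  rw [show (PySem.Dict.mk (((pvGroups (PySem.Str.splitlines s)).foldl
        (fun d p => d.insert p.1 p.2) PySem.Dict.empty).items.map pvJ)).items
      = ((pvGroups (PySem.Str.splitlines s)).foldl
        (fun d p => d.insert p.1 p.2) PySem.Dict.empty).items.map pvJ from rfl] at hitems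
  rw [show ((PySem.Dict.empty : PySem.Dict String (List String)).items.map pvJ) = [] from rfl] at hitems
  rw [show pvJ = (fun p : String × List String => (p.1, PySem.Str.join "\n" p.2)) from rfl] at hitems
  exact hitems
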